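-- pv_equiv track=rewrite | github.com/ssaha6/SygusDisjunctive | sygus_old_syntax.py | learnHoudiniString
-- ===== SOURCE A (Python) =====
-- def learnHoudiniString(strFeatures, strFeatureVectors):
--
--         workList = {key: True for key in range(0, len(strFeatures))}
--         for idx in range(0, len(strFeatures)):
--             for vector in strFeatureVectors:
--                 if vector[idx] == "false":
--                     workList[idx] = False
--
--         terms = []
--         for idx in range(0, len(strFeatures)):
--             if workList[idx]:
--                 terms.append(strFeatures[idx])
--         return terms
-- ===== SOURCE B (Python) =====
-- def learnHoudiniString(strFeatures, strFeatureVectors):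
--     # Candidate-set pruning: iterate over vectors (row-major), and after each
--     # vector keep only the still-surviving feature indices; eliminated indices
--     # are never examined again.
--     keep = list(range(len(strFeatures)))
--     for vector in strFeatureVectors:
--         keep = [i for i in keep if vector[i] != "false"]
--     return [strFeatures[i] for i in keep]
-- ===== Notes on version B (the rewrite author's own statement) =====
-- stated objective: alternative
-- what changed: Replaces A's index-major double loop over a boolean worklist dict by row-major candidate-set pruning: a surviving-index list is filtered once per vector, so eliminated indices are never revisited, then mapped to features.
import Mathlib
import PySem

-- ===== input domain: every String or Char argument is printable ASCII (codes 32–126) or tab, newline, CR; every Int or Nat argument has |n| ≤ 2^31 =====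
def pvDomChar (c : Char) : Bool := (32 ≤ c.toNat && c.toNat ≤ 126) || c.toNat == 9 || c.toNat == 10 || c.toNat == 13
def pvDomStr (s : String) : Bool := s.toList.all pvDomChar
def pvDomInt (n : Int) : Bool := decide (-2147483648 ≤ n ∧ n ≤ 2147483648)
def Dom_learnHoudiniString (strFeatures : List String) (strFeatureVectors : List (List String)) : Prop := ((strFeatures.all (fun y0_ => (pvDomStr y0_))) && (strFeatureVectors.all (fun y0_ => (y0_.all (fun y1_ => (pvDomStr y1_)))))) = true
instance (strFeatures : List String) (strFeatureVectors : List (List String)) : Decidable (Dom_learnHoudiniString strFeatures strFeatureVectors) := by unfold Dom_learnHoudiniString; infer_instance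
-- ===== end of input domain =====

-- B replaces A's index-major worklist-dict loops by row-major candidate-set pruning (a surviving-index list filtered per vector); objective: alternative.


-- ===== PORT A =====
def learnHoudiniString (strFeatures : List String) (strFeatureVectors : List (List String)) : List String :=
  let n : Int := PySem.List.len strFeatures
  let workList : PySem.Dict Int Bool :=
    (PySem.List.pyRange 0 n 1).foldl (fun d k => d.insert k true) PySem.Dict.empty
  let workList :=
    (PySem.List.pyRange 0 n 1).foldl (fun d idx =>
      strFeatureVectors.foldl (fun d vector =>
        if PySem.List.pyGet? vector idx = some "false" then d.insert idx false else d) d) workList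
  (PySem.List.pyRange 0 n 1).foldl (fun terms idx =>
    if workList.getD idx false then terms ++ [PySem.List.pyGetD strFeatures idx ""] else terms) []

-- ===== PORT B =====
-- row-major candidate-set pruning: filter the surviving-index list once per vector
def learnHoudiniString_alt (strFeatures : List String) (strFeatureVectors : List (List String)) : List String :=
  let keep0 := PySem.List.pyRange 0 (PySem.List.len strFeatures) 1
  let keep := strFeatureVectors.foldl
    (fun keep vector => keep.filter (fun i => !(PySem.List.pyGetD vector i "" == "false"))) keep0
  keep.map (fun i => PySem.List.pyGetD strFeatures i "")

-- ===== PRECONDITION & SPEC =====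
-- Pre_ excludes inputs where some vector is shorter than strFeatures, on which A raises IndexError.
def Pre_learnHoudiniString (strFeatures : List String) (strFeatureVectors : List (List String)) : Prop :=
  ∀ v ∈ strFeatureVectors, strFeatures.length ≤ v.length
instance (strFeatures : List String) (strFeatureVectors : List (List String)) : Decidable (Pre_learnHoudiniString strFeatures strFeatureVectors) := by unfold Pre_learnHoudiniString; infer_instance
def pvWitness_learnHoudiniString : List String × List (List String) :=
  (["a", "b", "c"], [["true", "false", "x"], ["true", "true", "false"]])
def Spec_learnHoudiniString (strFeatures : List String) (strFeatureVectors : List (List String)) (out : List String) : Prop := out = learnHoudiniString_alt strFeatures strFeatureVectors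
instance (strFeatures : List String) (strFeatureVectors : List (List String)) (out : List String) : Decidable (Spec_learnHoudiniString strFeatures strFeatureVectors out) := by unfold Spec_learnHoudiniString; infer_instance

-- ===== CLAIM (what is proved, stated in full; the proofs are below) =====
def Claim_equal_learnHoudiniString : Prop := ∀ (strFeatures : List String) (strFeatureVectors : List (List String)), Dom_learnHoudiniString strFeatures strFeatureVectors → Pre_learnHoudiniString strFeatures strFeatureVectors → Spec_learnHoudiniString strFeatures strFeatureVectors (learnHoudiniString strFeatures strFeatureVectors)

-- ===== LEMMAS AND PROOFS =====

-- "no vector has 'false' at index i" as A's loop tests it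
def pvAllOk (vs : List (List String)) (i : Int) : Bool :=
  vs.all (fun v => !(PySem.List.pyGet? v i == some "false"))

theorem pv_getD_init (L : List Int) (d : PySem.Dict Int Bool) (j : Int) :
    ((L.foldl (fun d k => d.insert k true) d).getD j false)
      = (decide (j ∈ L) || d.getD j false) := by
  induction L generalizing d with
  | nil => simp
  | cons a L ih =>
      simp only [List.foldl_cons, ih, PySem.Dict.getD_insert, List.mem_cons]
      by_cases h : j = a <;> simp [h]

theorem pv_getD_inner (vs : List (List String)) (d : PySem.Dict Int Bool) (idx j : Int) :
    ((vs.foldl (fun d v =>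
        if PySem.List.pyGet? v idx = some "false" then d.insert idx false else d) d).getD j false)
      = if j = idx then (d.getD j false && pvAllOk vs idx) else d.getD j false := by
  induction vs generalizing d with
  | nil => simp [pvAllOk]
  | cons v vs ih =>
      simp only [List.foldl_cons, ih, pvAllOk, List.all_cons]
      by_cases hv : PySem.List.pyGet? v idx = some "false"
      · by_cases hj : j = idx <;>
          simp [hv, hj, PySem.Dict.getD_insert]
      · have hb : (PySem.List.pyGet? v idx == some "false") = false := by
          simpa using hv
        by_cases hj : j = idx <;> simp [hv, hb, hj]

theorem pv_getD_outer (vs : List (List String)) (L : List Int) (d : PySem.Dict Int Bool) (j : Int) :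
    ((L.foldl (fun d idx =>
        vs.foldl (fun d v =>
          if PySem.List.pyGet? v idx = some "false" then d.insert idx false else d) d) d).getD j false)
      = (d.getD j false && (if j ∈ L then pvAllOk vs j else true)) := by
  induction L generalizing d with
  | nil => simp
  | cons a L ih =>
      simp only [List.foldl_cons, ih, pv_getD_inner, List.mem_cons]
      by_cases hj : j = a <;> by_cases hL : j ∈ L <;>
        simp [hj, hL, Bool.and_comm] <;> tauto

-- B's row-major pruning fold collapses to one filter with the conjunction of all per-vector tests
theorem pv_foldl_filter (vs : List (List String)) (p : List String → Int → Bool) (ks : List Int) :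
    (vs.foldl (fun ks v => ks.filter (p v)) ks)
      = ks.filter (fun i => vs.all (fun v => p v i)) := by
  induction vs generalizing ks with
  | nil => simp
  | cons v vs ih =>
      simp only [List.foldl_cons, ih, List.filter_filter, List.all_cons]
      apply List.filter_congr
      intro i _
      exact Bool.and_comm _ _

theorem pv_all_congr {α : Type} (l : List α) (p q : α → Bool) (h : ∀ x ∈ l, p x = q x) :
    l.all p = l.all q := by
  induction l with
  | nil => rfl
  | cons x l ih =>
      simp only [List.all_cons, h x (List.mem_cons_self), ih (fun y hy => h y (List.mem_cons_of_mem x hy))]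

theorem pv_allOk_eq (vs : List (List String)) (f : List String) (j : Int)
    (hpre : ∀ v ∈ vs, f.length ≤ v.length) (h0 : 0 ≤ j) (hj : j < (f.length : Int)) :
    pvAllOk vs j = vs.all (fun v => !(PySem.List.pyGetD v j "" == "false")) := by
  unfold pvAllOk
  apply pv_all_congr
  intro v hv
  have hlen : j < (v.length : Int) := lt_of_lt_of_le hj (by exact_mod_cast hpre v hv)
  rw [PySem.List.pyGet?_eq_some_getElem v h0 hlen, PySem.List.pyGetD_eq_getElem v "" h0 hlen]
  simp

-- ===== VERDICT =====
theorem learnHoudiniString_spec : Claim_equal_learnHoudiniString := by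
  intro f vs _hdom hpre
  unfold Spec_learnHoudiniString learnHoudiniString learnHoudiniString_alt
  simp only
  -- collapse A's collect loop to a filter over the range, using the dict characterisation
  have hcong := PySem.List.foldl_congr_mem (PySem.List.pyRange 0 (PySem.List.len f) 1)
      (fun terms idx =>
        if (((PySem.List.pyRange 0 (PySem.List.len f) 1).foldl (fun d idx =>
              vs.foldl (fun d vector =>
                if PySem.List.pyGet? vector idx = some "false" then d.insert idx false else d) d)
              ((PySem.List.pyRange 0 (PySem.List.len f) 1).foldl
                (fun d k => d.insert k true) PySem.Dict.empty)).getD idx false)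
          then terms ++ [PySem.List.pyGetD f idx ""] else terms)
      (fun terms idx =>
        if pvAllOk vs idx then terms ++ [PySem.List.pyGetD f idx ""] else terms)
      []
      (by
        intro acc idx hidx
        simp only [pv_getD_outer, pv_getD_init]
        obtain ⟨h1, h2⟩ := (PySem.List.mem_pyRange_one).1 (by simpa using hidx)
        simp [h1, h2])
  rw [hcong, PySem.List.foldl_append_if]
  rw [pv_foldl_filter]
  simp only [List.nil_append]
  congr 1
  apply List.filter_congr
  intro j hj
  have hmem := (PySem.List.mem_pyRange_one).1 hj
  exact pv_allOk_eq vs f j hpre hmem.1 hmem.2
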